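-- pv_equiv track=rewrite | github.com/devahuja811/Search-Engine-Tokenizer | src/main.py | checkVowelPresence
-- ===== SOURCE A (Python) =====
-- def checkVowelPresence(word, endLength, vowels):
--     firstVowel=-2
--     firstConsonant=-1
--     # end length specified to only iterate until the suffix as suffix needs to be modified
--     for i in range(len(word[:endLength])):
--         if word[i] in vowels:
--             firstVowel=i
--             break
--
--     for j in range(len(word[:endLength])):
--         if word[j] not in vowels and j>firstVowel:
--             firstConsonant=j
--             break
--
--     return word[:endLength]+"ee" if firstVowel >-1 and firstConsonant>firstVowel else word
-- ===== SOURCE B (Python) =====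
-- def checkVowelPresence(word, endLength, vowels):
--     prefix = word[:endLength]
--     vowel_seen = False
--     for ch in prefix:
--         if vowel_seen and ch not in vowels:
--             return prefix + "ee"
--         if not vowel_seen and ch in vowels:
--             vowel_seen = True
--     return word
-- ===== Notes on version B (the rewrite author's own statement) =====
-- stated objective: simpler
-- what changed: Replaces A's two sequential index-based scans over the prefix (first compute a first-vowel index, then a first later-consonant index, then compare them) with one stateful character pass carrying a vowel-seen flag and returning early.
import Mathlib
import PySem

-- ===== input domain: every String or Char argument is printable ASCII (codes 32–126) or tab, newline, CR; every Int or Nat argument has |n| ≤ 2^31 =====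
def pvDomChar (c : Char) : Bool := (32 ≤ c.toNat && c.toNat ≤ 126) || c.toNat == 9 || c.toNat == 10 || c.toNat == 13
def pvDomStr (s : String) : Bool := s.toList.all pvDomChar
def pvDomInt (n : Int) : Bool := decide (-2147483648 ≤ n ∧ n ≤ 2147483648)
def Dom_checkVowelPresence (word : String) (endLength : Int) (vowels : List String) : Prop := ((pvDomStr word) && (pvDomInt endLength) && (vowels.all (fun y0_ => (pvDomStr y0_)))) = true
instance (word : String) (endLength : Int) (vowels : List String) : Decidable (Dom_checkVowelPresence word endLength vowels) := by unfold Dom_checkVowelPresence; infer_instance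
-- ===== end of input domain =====

-- B replaces A's two sequential index scans with a single stateful pass (simpler decomposition, same cost).

-- ===== PORT A =====
-- first loop of A: first index i in the given index list with word[i] a vowel, else -2
def pvA_findVowel (cs : List Char) (vowels : List String) : List Int → Int
  | [] => -2
  | i :: rest =>
    if vowels.contains (String.mk [PySem.List.pyGetD cs i ' ']) then i
    else pvA_findVowel cs vowels rest

-- second loop of A: first index j with word[j] not a vowel and j > firstVowel, else -1
def pvA_findCons (cs : List Char) (vowels : List String) (firstVowel : Int) : List Int → Int
  | [] => -1
  | j :: rest =>
    if !(vowels.contains (String.mk [PySem.List.pyGetD cs j ' '])) && decide (j > firstVowel) then j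
    else pvA_findCons cs vowels firstVowel rest

def checkVowelPresence (word : String) (endLength : Int) (vowels : List String) : String :=
  let cs := word.toList
  let pre := PySem.List.slice cs none (some endLength)
  let fv := pvA_findVowel cs vowels (PySem.List.pyRange 0 (pre.length : Int) 1)
  let fc := pvA_findCons cs vowels fv (PySem.List.pyRange 0 (pre.length : Int) 1)
  if fv > -1 ∧ fc > fv then String.mk (pre ++ "ee".toList) else word

-- ===== PORT B =====
-- B's single pass: return prefix+"ee" at the first non-vowel after a seen vowel, else word
def pvB_loop (word : String) (pre : List Char) (vowels : List String) (seen : Bool) : List Char → String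
  | [] => word
  | c :: rest =>
    if seen && !(vowels.contains (String.mk [c])) then String.mk (pre ++ "ee".toList)
    else if !seen && vowels.contains (String.mk [c]) then pvB_loop word pre vowels true rest
    else pvB_loop word pre vowels seen rest

def checkVowelPresence_alt (word : String) (endLength : Int) (vowels : List String) : String :=
  let pre := PySem.List.slice word.toList none (some endLength)
  pvB_loop word pre vowels false pre

-- ===== PRECONDITION & SPEC =====
def Spec_checkVowelPresence (word : String) (endLength : Int) (vowels : List String) (out : String) : Prop := out = checkVowelPresence_alt word endLength vowels
instance (word : String) (endLength : Int) (vowels : List String) (out : String) : Decidable (Spec_checkVowelPresence word endLength vowels out) := by unfold Spec_checkVowelPresence; infer_instance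

-- ===== CLAIM (what is proved, stated in full; the proofs are below) =====
def Claim_equal_checkVowelPresence : Prop := ∀ (word : String) (endLength : Int) (vowels : List String), Dom_checkVowelPresence word endLength vowels → Spec_checkVowelPresence word endLength vowels (checkVowelPresence word endLength vowels)

-- ===== LEMMAS AND PROOFS =====

-- spec-side recursions (proof helpers only)
def pvFvSpec (vowels : List String) (a : Int) : List Char → Int
  | [] => -2
  | c :: r => if String.mk [c] ∈ vowels then a else pvFvSpec vowels (a + 1) r

def pvFcSpec (vowels : List String) (fv a : Int) : List Char → Int
  | [] => -1
  | c :: r => if String.mk [c] ∉ vowels ∧ a > fv then a else pvFcSpec vowels fv (a + 1) r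

def pvSpecB (vowels : List String) (seen : Bool) : List Char → Bool
  | [] => false
  | c :: r => if seen ∧ String.mk [c] ∉ vowels then true
              else pvSpecB vowels (seen || decide (String.mk [c] ∈ vowels)) r

theorem pvB_loop_eq (word : String) (pre : List Char) (vowels : List String) :
    ∀ (l : List Char) (seen : Bool),
      pvB_loop word pre vowels seen l =
        if pvSpecB vowels seen l then String.mk (pre ++ "ee".toList) else word := by
  intro l
  induction l with
  | nil => intro seen; simp [pvB_loop, pvSpecB]
  | cons c r ih =>
    intro seen
    by_cases hv : String.mk [c] ∈ vowels <;> cases seen <;>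
      simp [pvB_loop, pvSpecB, hv, ih]

theorem pvSpecB_true (vowels : List String) :
    ∀ (l : List Char),
      (pvSpecB vowels true l = true ↔ ∃ c ∈ l, String.mk [c] ∉ vowels) := by
  intro l
  induction l with
  | nil => simp [pvSpecB]
  | cons c r ih =>
    by_cases hv : String.mk [c] ∈ vowels <;> simp [pvSpecB, hv, ih]

theorem pvFvSpec_range (vowels : List String) :
    ∀ (l : List Char) (a : Int), pvFvSpec vowels a l = -2 ∨ a ≤ pvFvSpec vowels a l := by
  intro l
  induction l with
  | nil => intro a; simp [pvFvSpec]
  | cons c r ih =>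
    intro a
    by_cases hv : String.mk [c] ∈ vowels
    · right; simp [pvFvSpec, hv]
    · rcases ih (a + 1) with h | h
      · left; simpa [pvFvSpec, hv] using h
      · right
        simp only [pvFvSpec, hv, if_false]
        omega

theorem pvFcSpec_any (vowels : List String) :
    ∀ (l : List Char) (fv a : Int), -1 ≤ fv → fv < a →
      (fv < pvFcSpec vowels fv a l ↔ ∃ c ∈ l, String.mk [c] ∉ vowels) := by
  intro l
  induction l with
  | nil => intro fv a h1 h2; simp [pvFcSpec]; omega
  | cons c r ih =>
    intro fv a h1 h2
    by_cases hv : String.mk [c] ∈ vowels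
    · have := ih fv (a + 1) h1 (by omega)
      simp [pvFcSpec, hv, this]
    · simp [pvFcSpec, hv, h2]

theorem pvCore (vowels : List String) :
    ∀ (l : List Char) (a : Int), 0 ≤ a →
      ((pvFvSpec vowels a l > -1 ∧ pvFcSpec vowels (pvFvSpec vowels a l) a l > pvFvSpec vowels a l) ↔
        pvSpecB vowels false l = true) := by
  intro l
  induction l with
  | nil => intro a ha; simp [pvFvSpec, pvFcSpec, pvSpecB]
  | cons c r ih =>
    intro a ha
    by_cases hv : String.mk [c] ∈ vowels
    · -- first vowel found here: fv = a
      have hfc := pvFcSpec_any vowels r a (a + 1) (by omega) (by omega)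
      have hsb := pvSpecB_true vowels r
      simp [pvFvSpec, pvFcSpec, pvSpecB, hv, hfc, hsb, show (-1:Int) < a from by omega]
    · -- not a vowel here
      have hfv := pvFvSpec_range vowels r (a + 1)
      simp only [pvFvSpec, pvFcSpec, pvSpecB, hv, if_false]
      rcases hfv with h | h
      · -- no vowel anywhere in the rest: both sides false
        have hstep := ih (a + 1) (by omega)
        have hsbf : pvSpecB vowels false r = false := by
          rcases hb : pvSpecB vowels false r
          · rfl
          · exfalso
            have h2 := hstep.mpr hb
            rw [h] at h2
            omega
        simp [pvFvSpec, pvFcSpec, pvSpecB, hv, h, hsbf]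
      · -- fv ≥ a+1 > a, so the consonant branch at a does not fire
        have hstep := ih (a + 1) (by omega)
        have hna : ¬ (a > pvFvSpec vowels (a + 1) r) := by omega
        simpa [pvFvSpec, pvFcSpec, pvSpecB, hv, hna] using hstep

-- A's index loops over range(a, a+n) on cs equal the spec recursions on the window of cs
theorem pvBridgeFV (cs : List Char) (vowels : List String) :
    ∀ (n : Nat) (a : Int), 0 ≤ a → a + n ≤ (cs.length : Int) →
      pvA_findVowel cs vowels (PySem.List.pyRange a (a + n) 1) =
        pvFvSpec vowels a ((cs.drop a.toNat).take n) := by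
  intro n
  induction n with
  | zero =>
    intro a ha hb
    rw [show a + ((0 : Nat) : Int) = a by simp, PySem.List.pyRange_one_eq_nil (le_refl a)]
    simp [pvA_findVowel, pvFvSpec]
  | succ n ih =>
    intro a ha hb
    have hb' : a + (n + 1) ≤ (cs.length : Int) := by push_cast at hb; omega
    have hlt : a < a + ((n + 1 : Nat) : Int) := by push_cast; omega
    have halen : a.toNat < cs.length := by omega
    rw [PySem.List.pyRange_one_cons hlt]
    have hdrop : cs.drop a.toNat = cs[a.toNat] :: cs.drop (a.toNat + 1) :=
      List.drop_eq_getElem_cons halen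
    have hget : PySem.List.pyGetD cs a ' ' = cs[a.toNat] :=
      PySem.List.pyGetD_eq_getElem cs ' ' ha (by omega)
    rw [hdrop]
    simp only [pvA_findVowel, pvFvSpec, List.take_succ_cons, hget]
    by_cases hv : String.mk [cs[a.toNat]] ∈ vowels
    · simp [hv]
    · simp only [hv, if_false, List.contains_eq_mem, decide_eq_true_eq, decide_false,
        Bool.false_eq_true, if_neg hv]
      have hrec := ih (a + 1) (by omega) (by push_cast; omega)
      rw [show a + ((n + 1 : Nat) : Int) = (a + 1) + (n : Int) by push_cast; ring,
        show (a + 1).toNat = a.toNat + 1 by omega] at *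
      simpa [hv] using hrec

theorem pvBridgeFC (cs : List Char) (vowels : List String) (fv : Int) :
    ∀ (n : Nat) (a : Int), 0 ≤ a → a + n ≤ (cs.length : Int) →
      pvA_findCons cs vowels fv (PySem.List.pyRange a (a + n) 1) =
        pvFcSpec vowels fv a ((cs.drop a.toNat).take n) := by
  intro n
  induction n with
  | zero =>
    intro a ha hb
    rw [show a + ((0 : Nat) : Int) = a by simp, PySem.List.pyRange_one_eq_nil (le_refl a)]
    simp [pvA_findCons, pvFcSpec]
  | succ n ih =>
    intro a ha hb
    have hlt : a < a + ((n + 1 : Nat) : Int) := by push_cast; omega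
    have halen : a.toNat < cs.length := by push_cast at hb; omega
    rw [PySem.List.pyRange_one_cons hlt]
    have hdrop : cs.drop a.toNat = cs[a.toNat] :: cs.drop (a.toNat + 1) :=
      List.drop_eq_getElem_cons halen
    have hget : PySem.List.pyGetD cs a ' ' = cs[a.toNat] :=
      PySem.List.pyGetD_eq_getElem cs ' ' ha (by push_cast at hb; omega)
    rw [hdrop]
    simp only [pvA_findCons, pvFcSpec, List.take_succ_cons, hget]
    by_cases hc : String.mk [cs[a.toNat]] ∉ vowels ∧ a > fv
    · simp [hc.1, hc.2]
    · have hrec := ih (a + 1) (by omega) (by push_cast at hb ⊢; omega)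
      rw [show a + ((n + 1 : Nat) : Int) = (a + 1) + (n : Int) by push_cast; ring,
        show (a + 1).toNat = a.toNat + 1 by omega] at *
      rw [if_neg hc]
      have hcb : (!(vowels.contains (String.mk [cs[a.toNat]])) && decide (a > fv)) = false := by
        by_cases hm : String.mk [cs[a.toNat]] ∈ vowels
        · simp [hm]
        · simp [hm, show ¬ (a > fv) from fun hh => hc ⟨hm, hh⟩]
      simp only [hcb, Bool.false_eq_true, if_false]
      exact hrec

-- the prefix slice is an honest take-prefix of cs
theorem pvSlice_take (cs : List Char) (b : Int) :
    ∃ k : Nat, k ≤ cs.length ∧ PySem.List.slice cs none (some b) = cs.take k := by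
  refine ⟨PySem.List.clampIdx cs.length b, ?_, ?_⟩
  · exact PySem.List.clampIdx_le cs.length b
  · simp [PySem.List.slice]

-- ===== VERDICT (by name: the statement is the Claim_ definition above) =====
theorem checkVowelPresence_spec : Claim_equal_checkVowelPresence := by
  intro word endLength vowels _
  unfold Spec_checkVowelPresence
  simp only [checkVowelPresence, checkVowelPresence_alt]
  set cs := word.toList with hcs
  obtain ⟨k, hk, hpre⟩ := pvSlice_take cs endLength
  rw [hpre]
  have hlen : (cs.take k).length = k := by simp [List.length_take, Nat.min_eq_left hk]
  have hfv := pvBridgeFV cs vowels k 0 (by omega) (by push_cast; omega)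
  have hfc := pvBridgeFC cs vowels (pvFvSpec vowels 0 ((cs.drop (0:Int).toNat).take k)) k 0 (by omega) (by push_cast; omega)
  simp only [Int.toNat_zero, List.drop_zero, zero_add] at hfv hfc
  rw [hlen, hfv, hfc, pvB_loop_eq]
  have hcore := pvCore vowels (cs.take k) 0 (by omega)
  by_cases h : pvFvSpec vowels 0 (cs.take k) > -1 ∧
      pvFcSpec vowels (pvFvSpec vowels 0 (cs.take k)) 0 (cs.take k) > pvFvSpec vowels 0 (cs.take k)
  · rw [if_pos h, if_pos (hcore.mp h)]
  · rw [if_neg h]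
    have : ¬ pvSpecB vowels false (cs.take k) = true := fun hb => h (hcore.mpr hb)
    simp [this]
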